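-- pv_equiv track=rewrite | github.com/JCapucho/universidade | 1ano1/FP/aula07/res/aula07e04.py | calculateTeamsScore
-- ===== SOURCE A (Python) =====
-- def calculateTeamsScore(results):
--     teamsScore = {}
--
--     for (match, result) in results.items():
--         # Iterate over the two teams that participated in the match and
--         # keep their index in the match
--         for i, team in enumerate(match):
--             # Get their record or initialize a new one
--             record = teamsScore.setdefault(team, [0, 0, 0, 0, 0, 0])
--
--             # Get the goals scored by the team we are currently processing
--             thisGoals = result[i]
--             # Get the goals scored by the other team, we use a modulus
--             # operations to wrap back to the first teams goals when processing
--             # the second team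
--             enemyGoals = result[(i + 1) % 2]
--
--             # Update the goals scored and suffered
--             record[3] += thisGoals
--             record[4] += enemyGoals
--
--             # Update the points and match results
--             if thisGoals < enemyGoals:
--                 record[2] += 1
--             elif thisGoals > enemyGoals:
--                 record[0] += 1
--                 record[-1] += 3
--             else:
--                 record[1] += 1
--                 record[-1] += 1
--
--     return teamsScore
-- ===== SOURCE B (Python) =====
-- def calculateTeamsScore(results):
--     # Group-by aggregation in two stages: first collect one (goals_for, goals_against)
--     # row per participation into per-team buckets, then compute each team's record
--     # from its bucket, with points as the closed form 3*wins + draws.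
--     buckets = {}
--     for (t1, t2), (g1, g2) in results.items():
--         buckets.setdefault(t1, []).append((g1, g2))
--         buckets.setdefault(t2, []).append((g2, g1))
--     table = {}
--     for t, mine in buckets.items():
--         w = sum(1 for gf, ga in mine if gf > ga)
--         d = sum(1 for gf, ga in mine if gf == ga)
--         l = sum(1 for gf, ga in mine if gf < ga)
--         table[t] = [w, d, l, sum(gf for gf, _ in mine), sum(ga for _, ga in mine), 3 * w + d]
--     return table
-- ===== Notes on version B (the rewrite author's own statement) =====
-- stated objective: alternative
-- what changed: B replaces A's single-pass accumulation into mutable per-team 6-field records by a two-stage group-by aggregation: it first collects one (goals_for, goals_against) row per participation into per-team buckets, then computes each team's record from its bucket by counting wins/draws/losses and summing goals, with points as the closed form 3*wins + draws instead of A's incremental point updates.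
import Mathlib
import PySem

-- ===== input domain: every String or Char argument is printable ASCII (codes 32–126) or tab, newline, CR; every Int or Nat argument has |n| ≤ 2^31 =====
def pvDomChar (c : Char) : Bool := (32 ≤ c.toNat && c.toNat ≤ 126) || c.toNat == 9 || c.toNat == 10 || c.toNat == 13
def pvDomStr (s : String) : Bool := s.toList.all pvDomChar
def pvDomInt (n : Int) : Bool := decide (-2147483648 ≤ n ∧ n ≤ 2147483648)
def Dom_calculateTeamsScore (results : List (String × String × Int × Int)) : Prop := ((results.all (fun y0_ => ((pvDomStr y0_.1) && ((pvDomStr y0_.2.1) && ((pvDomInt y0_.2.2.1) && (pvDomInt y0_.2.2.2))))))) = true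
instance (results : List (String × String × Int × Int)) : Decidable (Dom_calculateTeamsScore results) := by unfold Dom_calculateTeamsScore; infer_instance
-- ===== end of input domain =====

-- B replaces A's single-pass accumulation into mutable records by a two-stage group-by:
-- collect one (gf, ga) row per participation into per-team buckets, then compute each
-- team's record from its bucket, with points as the closed form 3*wins + draws
-- (objective: alternative; not faster).


-- ===== PORT A =====
-- A mutates the 6-slot record in place; here the whole record is rebuilt with the same values
-- (record[3] += thisGoals, record[4] += enemyGoals, then the branch; record[-1] is slot 5).
def pvRecordA (r : List Int) (thisGoals enemyGoals : Int) : List Int :=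
  match r with
  | [w, d, l, gf, ga, p] =>
    let gf := gf + thisGoals
    let ga := ga + enemyGoals
    if thisGoals < enemyGoals then [w, d, l + 1, gf, ga, p]
    else if thisGoals > enemyGoals then [w + 1, d, l, gf, ga, p + 3]
    else [w, d + 1, l, gf, ga, p + 1]
  | _ => r  -- unreachable: every record in the table has 6 entries

def calculateTeamsScore (results : List (String × String × Int × Int)) : List (String × List Int) :=
  (results.foldl (fun teamsScore mr =>
    match mr with
    | (t1, t2, g1, g2) =>
      -- for i, team in enumerate(match): the match tuple is (t1, t2), the result (g1, g2)
      (PySem.List.enumerate [t1, t2]).foldl (fun ts it =>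
        match it with
        | (i, team) =>
          let ts := ts.setdefault team [0, 0, 0, 0, 0, 0]
          let thisGoals := PySem.List.pyGetD [g1, g2] i 0                                -- result[i], i ∈ {0,1}
          let enemyGoals := PySem.List.pyGetD [g1, g2] (PySem.Int.mod (i + 1) 2) 0       -- result[(i+1)%2]
          ts.modify team [0, 0, 0, 0, 0, 0] (fun r => pvRecordA r thisGoals enemyGoals)
      ) teamsScore) PySem.Dict.empty).items

-- ===== PORT B =====
-- Source B's per-team record from that team's bucket of (gf, ga) rows (points = 3*w + d)
def pvRecB (mine : List (Int × Int)) : List Int :=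
  let w : Int := (mine.countP (fun p => decide (p.2 < p.1)) : Int)
  let dr : Int := (mine.countP (fun p => decide (p.1 = p.2)) : Int)
  let lo : Int := (mine.countP (fun p => decide (p.1 < p.2)) : Int)
  [w, dr, lo, (mine.map (fun p => p.1)).sum, (mine.map (fun p => p.2)).sum, 3 * w + dr]

def calculateTeamsScore_alt (results : List (String × String × Int × Int)) : List (String × List Int) :=
  -- stage 1: buckets.setdefault(t, []).append((gf, ga)) for both teams of each match
  let buckets := results.foldl (fun d mr =>
    match mr with
    | (t1, t2, g1, g2) =>
      let d := d.modify t1 [] (fun l => l ++ [(g1, g2)])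
      d.modify t2 [] (fun l => l ++ [(g2, g1)])) PySem.Dict.empty
  -- stage 2: table[t] = record of t's bucket, in bucket (= first appearance) order
  (buckets.items.foldl (fun table kv => table.insert kv.1 (pvRecB kv.2)) PySem.Dict.empty).items

-- ===== PRECONDITION & SPEC =====
def Spec_calculateTeamsScore (results : List (String × String × Int × Int)) (out : List (String × List Int)) : Prop := out = calculateTeamsScore_alt results
instance (results : List (String × String × Int × Int)) (out : List (String × List Int)) : Decidable (Spec_calculateTeamsScore results out) := by unfold Spec_calculateTeamsScore; infer_instance

-- ===== CLAIM (what is proved, stated in full; the proofs are below) =====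
def Claim_equal_calculateTeamsScore : Prop := ∀ (results : List (String × String × Int × Int)), Dom_calculateTeamsScore results → Spec_calculateTeamsScore results (calculateTeamsScore results)

-- ===== LEMMAS AND PROOFS =====

def pvZ : List Int := [0, 0, 0, 0, 0, 0]

-- one (team, gf, ga) row per participation
def pvRows (results : List (String × String × Int × Int)) : List (String × Int × Int) :=
  results.flatMap (fun mr => [(mr.1, mr.2.2.1, mr.2.2.2), (mr.2.1, mr.2.2.2, mr.2.2.1)])

-- A's per-row update, in insert form
def pvStepA (d : PySem.Dict String (List Int)) (r : String × Int × Int) : PySem.Dict String (List Int) :=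
  d.insert r.1 (pvRecordA (d.getD r.1 pvZ) r.2.1 r.2.2)

theorem pv_insert_insert {d : PySem.Dict String (List Int)} {t : String} {v w : List Int}
    (h : d.contains t = false) : (d.insert t v).insert t w = d.insert t w := by
  apply PySem.Dict.ext
  have hall : ∀ p ∈ d.items, (p.1 == t) = false := by
    intro p hp
    by_contra hne
    have : d.contains t = true := by
      simp only [PySem.Dict.contains, List.any_eq_true]
      exact ⟨p, hp, by simpa using hne⟩
    simp [this] at h
  rw [PySem.Dict.items_insert_of_contains _ _ (PySem.Dict.contains_insert_self d t v),
      PySem.Dict.items_insert_of_not_contains _ _ h,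
      PySem.Dict.items_insert_of_not_contains _ _ h]
  rw [List.map_append]
  congr 1
  · calc (d.items.map fun p => if (p.1 == t) = true then (t, w) else p)
        = d.items.map id := List.map_congr_left (fun p hp => by simp [hall p hp])
      _ = d.items := List.map_id d.items
  · simp

theorem pv_row_step (d : PySem.Dict String (List Int)) (t : String) (a b : Int) :
    (d.setdefault t [0, 0, 0, 0, 0, 0]).modify t [0, 0, 0, 0, 0, 0] (fun r => pvRecordA r a b) = pvStepA d (t, a, b) := by
  by_cases h : d.contains t = true
  · rw [PySem.Dict.setdefault_of_contains d _ h]; rfl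
  · have h' : d.contains t = false := by simpa using h
    rw [PySem.Dict.setdefault_of_not_contains d _ h']
    show (d.insert t [0, 0, 0, 0, 0, 0]).insert t
        (pvRecordA ((d.insert t [0, 0, 0, 0, 0, 0]).getD t [0, 0, 0, 0, 0, 0]) a b) = _
    rw [PySem.Dict.getD_insert_self, pv_insert_insert h']
    unfold pvStepA
    rw [PySem.Dict.getD_of_not_contains d _ h']
    rfl

-- A's fold over matches is the fold of pvStepA over the flattened rows
theorem pv_fold_rows (results : List (String × String × Int × Int)) (d : PySem.Dict String (List Int)) :
    (results.foldl (fun teamsScore mr =>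
      match mr with
      | (t1, t2, g1, g2) =>
        (PySem.List.enumerate [t1, t2]).foldl (fun ts it =>
          match it with
          | (i, team) =>
            let ts := ts.setdefault team [0, 0, 0, 0, 0, 0]
            let thisGoals := PySem.List.pyGetD [g1, g2] i 0
            let enemyGoals := PySem.List.pyGetD [g1, g2] (PySem.Int.mod (i + 1) 2) 0
            ts.modify team [0, 0, 0, 0, 0, 0] (fun r => pvRecordA r thisGoals enemyGoals)
        ) teamsScore) d) =
    (pvRows results).foldl pvStepA d := by
  induction results generalizing d with
  | nil => rfl
  | cons m l ih =>
    obtain ⟨t1, t2, g1, g2⟩ := m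
    rw [List.foldl_cons, ih]
    show (pvRows l).foldl pvStepA _ = _
    have hrows : pvRows ((t1, t2, g1, g2) :: l) = (t1, g1, g2) :: (t2, g2, g1) :: pvRows l := rfl
    rw [hrows, List.foldl_cons, List.foldl_cons]
    congr 1
    have h0 : PySem.List.pyGetD [g1, g2] 0 (0 : Int) = g1 := rfl
    have h1 : PySem.List.pyGetD [g1, g2] (PySem.Int.mod 1 2) (0 : Int) = g2 := rfl
    have h2 : PySem.List.pyGetD [g1, g2] 1 (0 : Int) = g2 := rfl
    have h3 : PySem.List.pyGetD [g1, g2] (PySem.Int.mod (1 + 1) 2) (0 : Int) = g1 := rfl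
    simp only [PySem.List.enumerate_cons, PySem.List.enumerate_nil, List.foldl_cons,
      List.foldl_nil, zero_add, h0, h1, h2, h3]
    rw [pv_row_step, pv_row_step]

-- B's bucket-building fold over matches is the row-wise fold over the flattened rows
theorem pv_buckets_rows (results : List (String × String × Int × Int)) (d : PySem.Dict String (List (Int × Int))) :
    (results.foldl (fun d mr =>
      match mr with
      | (t1, t2, g1, g2) =>
        let d := d.modify t1 [] (fun l => l ++ [(g1, g2)])
        d.modify t2 [] (fun l => l ++ [(g2, g1)])) d) =
    (pvRows results).foldl (fun d p => d.modify p.1 [] (fun x => x ++ [p.2])) d := by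
  induction results generalizing d with
  | nil => rfl
  | cons m l ih =>
    obtain ⟨t1, t2, g1, g2⟩ := m
    rw [List.foldl_cons, ih]
    rfl

-- the value stored for team t after folding pvStepA
theorem pv_fold_getD (rows : List (String × Int × Int)) (d : PySem.Dict String (List Int)) (t : String) :
    (rows.foldl pvStepA d).getD t pvZ =
    (rows.filter (fun r => r.1 == t)).foldl (fun rec r => pvRecordA rec r.2.1 r.2.2) (d.getD t pvZ) := by
  induction rows generalizing d with
  | nil => rfl
  | cons r rows ih =>
    rw [List.foldl_cons, ih]
    by_cases h : r.1 = t
    · subst h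
      rw [List.filter_cons_of_pos (by simp), List.foldl_cons]
      congr 1
      show (d.insert r.1 _).getD r.1 pvZ = _
      rw [PySem.Dict.getD_insert_self]
    · rw [List.filter_cons_of_neg (by simp [h])]
      congr 1
      show (d.insert r.1 _).getD t pvZ = _
      rw [PySem.Dict.getD_insert_of_ne _ _ _ (Ne.symm h)]

-- folding pvRecordA over a team's (gf, ga) pairs equals Source B's closed-form record
theorem pv_record_closed (mine : List (Int × Int)) (w0 d0 l0 f0 a0 p0 : Int) :
    mine.foldl (fun rec p => pvRecordA rec p.1 p.2) [w0, d0, l0, f0, a0, p0] =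
    [w0 + (mine.countP (fun p => decide (p.2 < p.1)) : Int),
     d0 + (mine.countP (fun p => decide (p.1 = p.2)) : Int),
     l0 + (mine.countP (fun p => decide (p.1 < p.2)) : Int),
     f0 + (mine.map (fun p => p.1)).sum,
     a0 + (mine.map (fun p => p.2)).sum,
     p0 + 3 * (mine.countP (fun p => decide (p.2 < p.1)) : Int)
        + (mine.countP (fun p => decide (p.1 = p.2)) : Int)] := by
  induction mine generalizing w0 d0 l0 f0 a0 p0 with
  | nil => simp
  | cons p mine ih =>
    rw [List.foldl_cons]
    rcases lt_trichotomy p.1 p.2 with hlt | heq | hgt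
    · have hrec : pvRecordA [w0, d0, l0, f0, a0, p0] p.1 p.2 =
          [w0, d0, l0 + 1, f0 + p.1, a0 + p.2, p0] := by simp [pvRecordA, hlt]
      rw [hrec, ih]
      simp only [List.countP_cons, List.map_cons, List.sum_cons]
      have h1 : ¬ p.2 < p.1 := by omega
      have h2 : ¬ p.1 = p.2 := by omega
      simp [h1, h2, hlt]
      and_intros <;> first | trivial | omega
    · have hrec : pvRecordA [w0, d0, l0, f0, a0, p0] p.1 p.2 =
          [w0, d0 + 1, l0, f0 + p.1, a0 + p.2, p0 + 1] := by simp [pvRecordA, heq]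
      rw [hrec, ih]
      simp only [List.countP_cons, List.map_cons, List.sum_cons]
      simp [heq]
      and_intros <;> first | trivial | omega
    · have hrec : pvRecordA [w0, d0, l0, f0, a0, p0] p.1 p.2 =
          [w0 + 1, d0, l0, f0 + p.1, a0 + p.2, p0 + 3] := by
        simp [pvRecordA, hgt, asymm hgt]
      rw [hrec, ih]
      simp only [List.countP_cons, List.map_cons, List.sum_cons]
      have h2 : ¬ p.1 = p.2 := by omega
      have h3 : ¬ p.1 < p.2 := by omega
      simp [h2, h3, hgt]
      and_intros <;> first | trivial | omega

-- a Nodup dict is its keys paired with their values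
theorem pv_items_eq_keys_map {ν : Type} (d : PySem.Dict String ν) (z : ν) (h : d.keys.Nodup) :
    d.items = d.keys.map (fun k => (k, d.getD k z)) := by
  simp only [PySem.Dict.keys, List.map_map]
  calc d.items = d.items.map id := (List.map_id d.items).symm
    _ = d.items.map (fun p => (p.1, d.getD p.1 z)) := by
        apply List.map_congr_left
        intro p hp
        obtain ⟨k, v⟩ := p
        simp [PySem.Dict.getD_of_mem_items d hp h z]
    _ = _ := by simp [Function.comp]

-- ===== VERDICT (by name: the statement is the Claim_ definition above) =====
theorem calculateTeamsScore_spec : Claim_equal_calculateTeamsScore := by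
  intro results _
  unfold Spec_calculateTeamsScore calculateTeamsScore calculateTeamsScore_alt
  rw [pv_fold_rows, pv_buckets_rows]
  set rows := pvRows results with hrows
  set A := rows.foldl pvStepA (PySem.Dict.empty : PySem.Dict String (List Int)) with hA
  set bk := rows.foldl (fun d p => d.modify p.1 [] (fun x => x ++ [p.2]))
      (PySem.Dict.empty : PySem.Dict String (List (Int × Int))) with hbk
  -- both key lists are the team names deduped in first-appearance order
  have hAnodup : A.keys.Nodup := by
    rw [hA]; unfold pvStepA
    exact PySem.Dict.nodup_keys_foldl_insert_key rows (fun r => r.1)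
      (fun d r => pvRecordA (d.getD r.1 pvZ) r.2.1 r.2.2) PySem.Dict.empty
      (by simp [PySem.Dict.keys, PySem.Dict.empty])
  have hbnodup : bk.keys.Nodup := by
    rw [hbk]
    exact PySem.Dict.nodup_keys_foldl_modify_key rows (fun p => p.1) []
      (fun _ p x => x ++ [p.2]) PySem.Dict.empty (by simp [PySem.Dict.keys, PySem.Dict.empty])
  have hAkeys : A.keys = PySem.Set.update [] (rows.map (fun r => r.1)) := by
    rw [hA]; unfold pvStepA
    exact PySem.Dict.keys_foldl_insert_key rows (fun r => r.1)
      (fun d r => pvRecordA (d.getD r.1 pvZ) r.2.1 r.2.2) PySem.Dict.empty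
  have hbkeys : bk.keys = PySem.Set.update [] (rows.map (fun p => p.1)) := by
    rw [hbk]
    exact PySem.Dict.keys_foldl_modify_key rows (fun p => p.1) []
      (fun _ p x => x ++ [p.2]) PySem.Dict.empty
  -- B's second stage: fresh distinct keys, so items map directly
  have hB : (bk.items.foldl (fun table kv => table.insert kv.1 (pvRecB kv.2))
        PySem.Dict.empty).items =
      (PySem.Dict.empty : PySem.Dict String (List Int)).items ++
        bk.items.map (fun kv => (kv.1, pvRecB kv.2)) :=
    PySem.Dict.items_foldl_insert_fresh bk.items (fun kv => kv.1) (fun kv => pvRecB kv.2)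
      PySem.Dict.empty (fun a _ => rfl) hbnodup
  rw [hB]
  show _ = [] ++ _
  rw [List.nil_append, pv_items_eq_keys_map bk [] hbnodup,
      pv_items_eq_keys_map A pvZ hAnodup, List.map_map, hAkeys, hbkeys]
  apply List.map_congr_left
  intro t _
  show (t, A.getD t pvZ) = (t, pvRecB (bk.getD t []))
  congr 1
  rw [hA, pv_fold_getD, hbk, PySem.Dict.getD_foldl_modify_append]
  have he : (PySem.Dict.empty : PySem.Dict String (List Int)).getD t pvZ = pvZ := rfl
  rw [he]
  have hm : (rows.filter (fun r => r.1 == t)).foldl (fun rec r => pvRecordA rec r.2.1 r.2.2) pvZ =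
      ((rows.filter (fun r => r.1 == t)).map (fun r => r.2)).foldl
        (fun rec p => pvRecordA rec p.1 p.2) pvZ :=
    by rw [List.foldl_map]
  rw [hm]
  show _ = pvRecB ([] ++ (rows.filter (fun p => p.1 == t)).map (fun x => x.2))
  rw [List.nil_append]
  unfold pvZ pvRecB
  rw [pv_record_closed]
  simp
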